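-- pv_equiv track=rewrite | github.com/Daringpark/academic | TEST01/광주_1반_박민철/problem08.py | find_solo
-- ===== SOURCE A (Python) =====
-- def find_solo(number_list):
--     pass
--     # 여기에 코드를 작성하여 함수를 완성합니다.
--     new_set = sorted(set(number_list))
--     over_dict = {}
--     for number in new_set : # initial dictionary setting
--         over_dict[number] = 0
--     for number in number_list : # For value 2 count
--         over_dict[number] += 1
--
--     for number in over_dict.keys() : # 출력 for문
--         if over_dict[number] == 1 :
--             return number
-- ===== SOURCE B (Python) =====
-- def find_solo(number_list):
--     singles = [x for x in number_list if number_list.count(x) == 1]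
--     return min(singles) if singles else None
-- ===== Notes on version B (the rewrite author's own statement) =====
-- stated objective: simpler
-- what changed: B eliminates A's sorted-unique traversal and both dictionary-building loops entirely: it filters the singleton elements straight out of the input list and returns their min (None if there are none), so no sort, no set and no count table exist at any point.
import Mathlib
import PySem

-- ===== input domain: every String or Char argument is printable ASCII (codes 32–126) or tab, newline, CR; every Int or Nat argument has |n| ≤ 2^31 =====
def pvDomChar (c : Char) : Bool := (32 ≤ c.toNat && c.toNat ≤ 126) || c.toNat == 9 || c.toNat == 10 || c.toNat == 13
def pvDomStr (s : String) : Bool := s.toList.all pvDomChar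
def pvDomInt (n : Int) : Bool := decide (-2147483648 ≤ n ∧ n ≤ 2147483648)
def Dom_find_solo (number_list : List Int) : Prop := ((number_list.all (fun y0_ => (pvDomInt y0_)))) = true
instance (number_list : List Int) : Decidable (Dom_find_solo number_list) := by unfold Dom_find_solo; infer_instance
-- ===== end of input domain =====

-- B drops A's sort, set and count dictionary entirely: it filters the singleton
-- elements from the list and returns their min (simpler; not claimed faster).

-- ===== PORT A =====
def find_solo (number_list : List Int) : Option Int :=
  -- new_set = sorted(set(number_list))
  let new_set := PySem.List.sorted (PySem.Set.ofList number_list) (fun x => x) false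
  -- over_dict = {}; for number in new_set: over_dict[number] = 0
  let over_dict := new_set.foldl (fun d number => d.insert number (0 : Int)) PySem.Dict.empty
  -- for number in number_list: over_dict[number] += 1
  let over_dict := number_list.foldl (fun d number => d.modify number 0 (fun v => v + 1)) over_dict
  -- for number in over_dict.keys(): if over_dict[number] == 1: return number
  -- (every key iterated is present, so the getD 0 lookup is Python's d[number] exactly)
  over_dict.keys.find? (fun number => over_dict.getD number 0 == 1)

-- ===== PORT B =====
def find_solo_alt (number_list : List Int) : Option Int :=
  -- singles = [x for x in number_list if number_list.count(x) == 1]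
  let singles := number_list.filter (fun x => number_list.count x == 1)
  -- return min(singles) if singles else None
  if singles.isEmpty then none else PySem.List.min? singles (fun x => x)

-- ===== PRECONDITION & SPEC =====
def Spec_find_solo (number_list : List Int) (out : Option Int) : Prop := out = find_solo_alt number_list
instance (number_list : List Int) (out : Option Int) : Decidable (Spec_find_solo number_list out) := by unfold Spec_find_solo; infer_instance

-- ===== CLAIM (what is proved, stated in full; the proofs are below) =====
def Claim_equal_find_solo : Prop := ∀ (number_list : List Int), Dom_find_solo number_list → Spec_find_solo number_list (find_solo number_list)

-- ===== LEMMAS AND PROOFS =====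

/-- Updating a set with elements it already contains leaves it unchanged. -/
lemma set_update_eq_self (s : PySem.Set Int) (l : List Int) (h : ∀ x ∈ l, x ∈ s) :
    PySem.Set.update s l = s := by
  induction l generalizing s with
  | nil => exact PySem.Set.update_nil s
  | cons x xs ih =>
      rw [PySem.Set.update_cons, PySem.Set.add_of_mem (h x (by simp))]
      exact ih s (fun y hy => h y (by simp [hy]))

/-- The zero-initialisation fold looks up 0 everywhere. -/
lemma getD_foldl_insert_zero (l : List Int) (d : PySem.Dict Int Int) (x : Int)
    (hd : d.getD x 0 = 0) :
    (l.foldl (fun d number => d.insert number (0 : Int)) d).getD x 0 = 0 := by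
  induction l generalizing d with
  | nil => exact hd
  | cons y ys ih =>
      refine ih _ ?_
      by_cases hxy : x = y
      · subst hxy; exact PySem.Dict.getD_insert_self d x 0 0
      · rw [PySem.Dict.getD_insert_of_ne d 0 0 hxy]; exact hd

/-- On a strictly increasing list, the first match of a predicate is ≤ every match. -/
lemma find?_sorted_min {s : List Int} (hs : s.Pairwise (· < ·)) {p : Int → Bool} {a : Int}
    (h : s.find? p = some a) : ∀ b ∈ s, p b = true → a ≤ b := by
  induction s generalizing a with
  | nil => simp at h
  | cons x t ih =>
      rcases List.pairwise_cons.mp hs with ⟨hx, ht⟩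
      intro b hb hpb
      by_cases hpx : p x = true
      · have hax : a = x := by
          have := h; simp [hpx] at this; omega
        rcases List.mem_cons.mp hb with rfl | hbt
        · omega
        · exact hax ▸ le_of_lt (hx b hbt)
      · have h' : t.find? p = some a := by
          simpa [List.find?_cons, hpx] using h
        rcases List.mem_cons.mp hb with rfl | hbt
        · exact absurd hpb hpx
        · exact ih ht h' b hbt hpb

-- ===== VERDICT (by name: the statement is the Claim_ definition above) =====
theorem find_solo_spec : Claim_equal_find_solo := by
  intro number_list _
  unfold Spec_find_solo find_solo find_solo_alt
  set new_set := PySem.List.sorted (PySem.Set.ofList number_list) (fun x => x) false with hns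
  have hmem : ∀ x, x ∈ new_set ↔ x ∈ number_list := by
    intro x; rw [hns, PySem.List.mem_sorted, PySem.Set.mem_ofList]
  have hnd : new_set.Nodup :=
    ((PySem.List.sorted_perm (PySem.Set.ofList number_list) (fun x => x) false).nodup_iff).mpr
      (PySem.Set.nodup_ofList number_list)
  have hlt : new_set.Pairwise (· < ·) := PySem.List.sorted_ofList_pairwise_lt number_list
  -- keys after both folds are exactly new_set
  have hkeys :
      ((number_list.foldl (fun d number => d.modify number 0 (fun v => v + 1))
        (new_set.foldl (fun d number => d.insert number (0 : Int)) PySem.Dict.empty)).keys)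
        = new_set := by
    rw [PySem.Dict.keys_foldl_modify number_list 0 (fun _ _ v => v + 1),
        PySem.Dict.keys_foldl_insert new_set (fun _ _ => (0 : Int)),
        PySem.Dict.keys_empty, PySem.Set.update_nil_left,
        PySem.Set.ofList_eq_self_of_nodup new_set hnd]
    exact set_update_eq_self new_set number_list (fun x hx => (hmem x).mpr hx)
  -- every lookup in the finished dict is the count
  have hgetD : ∀ x : Int,
      ((number_list.foldl (fun d number => d.modify number 0 (fun v => v + 1))
        (new_set.foldl (fun d number => d.insert number (0 : Int)) PySem.Dict.empty)).getD x 0)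
        = (number_list.count x : Int) := by
    intro x
    rw [PySem.Dict.getD_foldl_modify_add_one number_list _ x,
        getD_foldl_insert_zero new_set PySem.Dict.empty x (PySem.Dict.getD_empty x 0)]
    ring
  simp only [hkeys, hgetD]
  -- both sides' predicates say "count = 1"
  have hpred : ∀ x : Int,
      (((number_list.count x : Int) == 1) = true) ↔ number_list.count x = 1 := by
    intro x; constructor
    · intro h; have := beq_iff_eq.mp h; exact_mod_cast this
    · intro h; simp [h]
  set singles := number_list.filter (fun x => number_list.count x == 1) with hsing
  have hsmem : ∀ b : Int, b ∈ singles ↔ b ∈ number_list ∧ number_list.count b = 1 := by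
    intro b; rw [hsing, List.mem_filter]; simp
  rcases hfa : new_set.find? (fun number => (number_list.count number : Int) == 1) with _ | a
  · -- A returns none: no singleton exists, so singles = []
    have hnone := List.find?_eq_none.mp hfa
    have hempty : singles = [] := by
      rcases hne : singles with _ | ⟨b, t⟩
      · rfl
      · exfalso
        have hb : b ∈ singles := by rw [hne]; exact List.mem_cons_self
        rcases (hsmem b).mp hb with ⟨hbl, hbc⟩
        have := hnone b ((hmem b).mpr hbl)
        simp [hbc] at this
    simp [hempty]
  · -- A returns some a
    have ha_mem : a ∈ new_set := List.mem_of_find?_eq_some hfa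
    have ha_p := List.find?_some hfa
    have ha_c : number_list.count a = 1 := (hpred a).mp ha_p
    have ha_l : a ∈ number_list := (hmem a).mp ha_mem
    have ha_s : a ∈ singles := (hsmem a).mpr ⟨ha_l, ha_c⟩
    have hne : singles.isEmpty = false := by
      rcases h : singles with _ | _
      · rw [h] at ha_s; simp at ha_s
      · simp
    rw [hne]
    simp only [Bool.false_eq_true, if_false]
    rcases hm : PySem.List.min? singles (fun x => x) with _ | m
    · rw [PySem.List.min?_eq_none_iff] at hm
      rw [hm] at ha_s; simp at ha_s
    · have hm_mem : m ∈ singles := PySem.List.min?_mem hm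
      rcases (hsmem m).mp hm_mem with ⟨hml, hmc⟩
      have h1 : a ≤ m := by
        refine find?_sorted_min hlt hfa m ((hmem m).mpr hml) ?_
        exact (hpred m).mpr hmc
      have h2 : m ≤ a := PySem.List.min?_isMin hm a ha_s
      have : a = m := le_antisymm h1 h2
      simp [this]
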